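-- pv_equiv track=rewrite | github.com/NikitaTiv/ShoppingBot | categorization/categorization.py | add_categories_to_file
-- ===== SOURCE A (Python) =====
-- def add_categories_to_file(input_categories: str, check: str) -> str:
--     for number, good in enumerate(check):
--         if "name" in good:
--             result_category = "не определена"
--             key_name = good["name"].replace(".", " ").replace(",", " ").replace("/", " ")
--             good_as_list = key_name.lower().split()
--             for category in input_categories:
--                 for word in good_as_list:
--                     if word in input_categories[category]:
--                         result_category = category
--                         break
--             check[number]["category"] = result_category
--     return check
-- ===== SOURCE B (Python) =====
-- # Inverted index word -> last category index; per good take the max index over its words.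
-- # Like A, updates the good dicts of `check` in place and returns `check`.
-- def add_categories_to_file(input_categories, check):
--     names = list(input_categories)
--     index = {}
--     for i, words in enumerate(input_categories.values()):
--         for w in words:
--             index[w] = i
--     get = index.get
--     for good in check:
--         if "name" in good:
--             ws = good["name"].replace(".", " ").replace(",", " ").replace("/", " ").lower().split()
--             best = -1
--             for w in ws:
--                 j = get(w, -1)
--                 if j > best:
--                     best = j
--             good["category"] = names[best] if best >= 0 else "не определена"
--     return check
-- ===== Notes on version B (the rewrite author's own statement) =====
-- stated objective: alternative
-- what changed: B builds a word -> last-category-index inverted index once and picks each good's category as the category of the maximal index over its words, instead of A's rescan of every category's word list for every good.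
import Mathlib
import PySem

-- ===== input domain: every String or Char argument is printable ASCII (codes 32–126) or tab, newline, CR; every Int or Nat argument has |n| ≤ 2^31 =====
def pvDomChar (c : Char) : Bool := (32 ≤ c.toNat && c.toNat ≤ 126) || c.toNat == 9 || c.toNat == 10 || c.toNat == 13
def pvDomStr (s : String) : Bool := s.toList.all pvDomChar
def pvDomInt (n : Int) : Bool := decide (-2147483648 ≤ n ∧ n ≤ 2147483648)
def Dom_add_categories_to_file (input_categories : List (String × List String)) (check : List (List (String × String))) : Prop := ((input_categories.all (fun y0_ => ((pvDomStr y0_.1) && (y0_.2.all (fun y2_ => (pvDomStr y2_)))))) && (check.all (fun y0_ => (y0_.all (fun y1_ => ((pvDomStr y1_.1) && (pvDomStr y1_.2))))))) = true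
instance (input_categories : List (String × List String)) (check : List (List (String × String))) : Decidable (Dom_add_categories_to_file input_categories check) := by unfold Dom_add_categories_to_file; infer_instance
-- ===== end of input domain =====

-- B replaces A's rescan of every category per good by a word -> last-category-index
-- inverted index built once (objective: alternative algorithm, same measured cost);
-- like A it updates the good dicts of `check` in place, the claim is about the return value.

-- ===== PORT A =====
-- the cleaned, lowercased word list of a good's name
def pvWords (s : String) : List String :=
  PySem.Str.split₀ (PySem.Str.lower
    (PySem.Str.replace (PySem.Str.replace (PySem.Str.replace s "." " ") "," " ") "/" " "))

def add_categories_to_file (input_categories : List (String × List String)) (check : List (List (String × String))) : List (List (String × String)) :=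
  let catsD : PySem.Dict String (List String) := PySem.Dict.mk input_categories
  (PySem.List.enumerate check 0).foldl (fun acc p =>
    let good : PySem.Dict String String := PySem.Dict.mk p.2
    if good.contains "name" then
      -- good["name"] is guarded by the containment test, so the total getD is exact here
      let good_as_list := pvWords (good.getD "name" "")
      let result_category := catsD.keys.foldl (fun r category =>
        -- inner 'for word …: if …: result = category; break' sets `category` iff some word matches
        if good_as_list.any (fun word => (catsD.getD category []).contains word)
        then category else r) "не определена"
      PySem.List.pySetD acc p.1 ((good.insert "category" result_category).items)
    else acc) check

-- ===== PORT B =====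
def add_categories_to_file_alt (input_categories : List (String × List String)) (check : List (List (String × String))) : List (List (String × String)) :=
  let names := input_categories.map (·.1)
  let index : PySem.Dict String Int :=
    (PySem.List.enumerate (input_categories.map (·.2)) 0).foldl
      (fun d p => p.2.foldl (fun d w => d.insert w p.1) d) PySem.Dict.empty
  check.map (fun g =>
    let good : PySem.Dict String String := PySem.Dict.mk g
    if good.contains "name" then
      let ws := pvWords (good.getD "name" "")
      let best := ws.foldl (fun b w => max b (index.getD w (-1))) (-1)
      (good.insert "category"
        (if 0 ≤ best then PySem.List.pyGetD names best "" else "не определена")).items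
    else g)

-- ===== PRECONDITION & SPEC =====
-- Pre_ excludes association lists carrying a duplicate key (in input_categories or in a good):
-- Python dicts cannot hold duplicate keys, so such lists exist only in the encoding and have
-- no faithful Python counterpart (building the dict collapses them, last value winning).
def Pre_add_categories_to_file (input_categories : List (String × List String)) (check : List (List (String × String))) : Prop :=
  (input_categories.map (·.1)).Nodup ∧ ∀ g ∈ check, (g.map (·.1)).Nodup
instance (input_categories : List (String × List String)) (check : List (List (String × String))) : Decidable (Pre_add_categories_to_file input_categories check) := by unfold Pre_add_categories_to_file; infer_instance

def pvWitness_add_categories_to_file : (List (String × List String)) × (List (List (String × String))) :=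
  ([("pets", ["dog", "cat"]), ("food", ["milk"])], [[("name", "big dog")], [("id", "7")]])

def Spec_add_categories_to_file (input_categories : List (String × List String)) (check : List (List (String × String))) (out : List (List (String × String))) : Prop := out = add_categories_to_file_alt input_categories check
instance (input_categories : List (String × List String)) (check : List (List (String × String))) (out : List (List (String × String))) : Decidable (Spec_add_categories_to_file input_categories check out) := by unfold Spec_add_categories_to_file; infer_instance

-- ===== CLAIM (what is proved, stated in full; the proofs are below) =====
def Claim_equal_add_categories_to_file : Prop := ∀ (input_categories : List (String × List String)) (check : List (List (String × String))), Dom_add_categories_to_file input_categories check → Pre_add_categories_to_file input_categories check → Spec_add_categories_to_file input_categories check (add_categories_to_file input_categories check)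

-- ===== LEMMAS AND PROOFS =====

-- L0: the enumerate/pySetD loop is a map
theorem pvSetLoop {α : Type} (c : α → Bool) (f : α → α) :
    ∀ (ck pre : List α),
      (PySem.List.enumerate ck (pre.length : Int)).foldl
        (fun acc p => if c p.2 then PySem.List.pySetD acc p.1 (f p.2) else acc) (pre ++ ck)
      = pre ++ ck.map (fun x => if c x then f x else x) := by
  intro ck
  induction ck with
  | nil => intro pre; simp [PySem.List.enumerate]
  | cons x t ih =>
    intro pre
    rw [PySem.List.enumerate_cons]
    simp only [List.foldl_cons]
    by_cases hc : c x
    · simp only [hc, if_true]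
      have h1 : PySem.List.pySetD (pre ++ x :: t) (pre.length : Int) (f x)
          = (pre ++ f x :: t) := by
        rw [PySem.List.pySetD_natCast]
        rw [List.set_append_right _ _ (le_refl pre.length)]
        simp
      rw [h1]
      have h2 := ih (pre ++ [f x])
      simp only [List.length_append, List.length_singleton, List.append_assoc,
        List.singleton_append] at h2
      rw [show ((pre.length : Int) + 1) = ((pre.length + 1 : Nat) : Int) by push_cast; ring]
      rw [h2]
      simp [hc]
    · simp only [hc, Bool.false_eq_true, if_false]
      have h2 := ih (pre ++ [x])
      simp only [List.length_append, List.length_singleton, List.append_assoc,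
        List.singleton_append] at h2
      rw [show ((pre.length : Int) + 1) = ((pre.length + 1 : Nat) : Int) by push_cast; ring]
      rw [h2]
      simp [hc]

def pvIdx (cats : List (String × List String)) : PySem.Dict String Int :=
  (PySem.List.enumerate (cats.map (·.2)) 0).foldl
    (fun d p => p.2.foldl (fun d w => d.insert w p.1) d) PySem.Dict.empty

theorem pvInsFold (v : Int) : ∀ (l : List String) (d : PySem.Dict String Int) (u : String),
    (l.foldl (fun d w => d.insert w v) d).getD u (-1)
      = if u ∈ l then v else d.getD u (-1) := by
  intro l
  induction l with
  | nil => intro d u; simp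
  | cons a t ih =>
    intro d u
    simp only [List.foldl_cons, ih, PySem.Dict.getD_insert, List.mem_cons]
    by_cases h1 : u ∈ t <;> by_cases h2 : u = a <;> simp [h1, h2]

theorem pvIdx_snoc (cats : List (String × List String)) (c : String × List String) :
    pvIdx (cats ++ [c]) = c.2.foldl (fun d w => d.insert w (cats.length : Int)) (pvIdx cats) := by
  unfold pvIdx
  rw [List.map_append, PySem.List.enumerate_append, List.foldl_append]
  simp

theorem pvIdx_bounds (w : String) : ∀ (cats : List (String × List String)),
    -1 ≤ (pvIdx cats).getD w (-1) ∧ (pvIdx cats).getD w (-1) < (cats.length : Int) := by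
  intro cats
  induction cats using List.reverseRecOn with
  | nil => simp [pvIdx]
  | append_singleton t c ih =>
    rw [pvIdx_snoc, pvInsFold]
    by_cases h : w ∈ c.2 <;> simp [h] <;> omega

theorem pvFoldMax_le (g : String → Int) (n : Int) : ∀ (ws : List String) (b : Int),
    b ≤ n → (∀ w ∈ ws, g w ≤ n) → ws.foldl (fun b w => max b (g w)) b ≤ n := by
  intro ws
  induction ws with
  | nil => intro b hb _; simpa using hb
  | cons a t ih =>
    intro b hb hg
    simp only [List.foldl_cons]
    exact ih _ (by have := hg a (by simp); omega) (fun w hw => hg w (by simp [hw]))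

theorem pvFoldMax_init_le (g : String → Int) : ∀ (ws : List String) (b : Int),
    b ≤ ws.foldl (fun b w => max b (g w)) b := by
  intro ws
  induction ws with
  | nil => intro b; simp
  | cons a t ih =>
    intro b
    simp only [List.foldl_cons]
    exact le_trans (le_max_left _ _) (ih _)

theorem pvFoldMax_ge (g : String → Int) : ∀ (ws : List String) (b : Int) (w : String),
    w ∈ ws → g w ≤ ws.foldl (fun b w => max b (g w)) b := by
  intro ws
  induction ws with
  | nil => intro b w h; simp at h
  | cons a t ih =>
    intro b w h
    rcases List.mem_cons.mp h with h | h
    · subst h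
      simp only [List.foldl_cons]
      exact le_trans (le_max_right _ _) (pvFoldMax_init_le g t _)
    · simp only [List.foldl_cons]; exact ih _ w h

theorem pvMain (ws : List String) (cats : List (String × List String)) :
    cats.foldl (fun r c => if ws.any (fun w => c.2.contains w) then c.1 else r) "не определена"
    = (if 0 ≤ ws.foldl (fun b w => max b ((pvIdx cats).getD w (-1))) (-1)
       then PySem.List.pyGetD (cats.map (·.1))
              (ws.foldl (fun b w => max b ((pvIdx cats).getD w (-1))) (-1)) ""
       else "не определена") := by
  induction cats using List.reverseRecOn with
  | nil =>
    have hle := pvFoldMax_le (fun w => (pvIdx []).getD w (-1)) (-1) ws (-1) le_rfl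
      (fun w _ => by have := (pvIdx_bounds w []).2; simp only [List.length_nil] at this; simpa using this)
    have hge := pvFoldMax_init_le (fun w => (pvIdx []).getD w (-1)) ws (-1)
    have hfold : ws.foldl (fun b w => max b ((pvIdx []).getD w (-1))) (-1) = -1 := le_antisymm hle hge
    rw [hfold]
    simp
  | append_singleton t c ih =>
    rw [List.foldl_append]
    simp only [List.foldl_cons, List.foldl_nil]
    have hg : ∀ w, (pvIdx (t ++ [c])).getD w (-1)
        = if w ∈ c.2 then (t.length : Int) else (pvIdx t).getD w (-1) := by
      intro w; rw [pvIdx_snoc, pvInsFold]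
    simp only [hg]
    by_cases h : ws.any (fun w => c.2.contains w)
    · obtain ⟨w, hw, hwc⟩ := List.any_eq_true.mp h
      have hwm : w ∈ c.2 := by simpa using hwc
      have hbest : ws.foldl (fun b w => max b (if w ∈ c.2 then (t.length : Int) else (pvIdx t).getD w (-1))) (-1)
          = (t.length : Int) := by
        apply le_antisymm
        · apply pvFoldMax_le _ _ _ _ (by omega)
          intro u _
          by_cases hu : u ∈ c.2
          · simp [hu]
          · have := (pvIdx_bounds u t).2; simp [hu]; omega
        · have := pvFoldMax_ge (fun w => if w ∈ c.2 then (t.length : Int) else (pvIdx t).getD w (-1)) ws (-1) w hw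
          simpa [hwm] using this
      rw [hbest, h]
      simp only [Int.natCast_nonneg, if_true, PySem.List.pyGetD_natCast, List.map_append]
      simp [List.getD_eq_getElem?_getD]
    · have hnot : ∀ u ∈ ws, u ∉ c.2 := by
        intro u hu hmem
        exact h (List.any_eq_true.mpr ⟨u, hu, by simpa using hmem⟩)
      have hbest : ws.foldl (fun b w => max b (if w ∈ c.2 then (t.length : Int) else (pvIdx t).getD w (-1))) (-1)
          = ws.foldl (fun b w => max b ((pvIdx t).getD w (-1))) (-1) := by
        apply PySem.List.foldl_congr_mem
        intro acc u hu
        simp [hnot u hu]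
      have hfalse : ws.any (fun w => c.2.contains w) = false := by simpa using h
      rw [hbest, hfalse]
      simp only [Bool.false_eq_true, if_false]
      rw [ih]
      by_cases hb : 0 ≤ ws.foldl (fun b w => max b ((pvIdx t).getD w (-1))) (-1)
      · have hlt : ws.foldl (fun b w => max b ((pvIdx t).getD w (-1))) (-1) ≤ (t.length : Int) - 1 :=
          pvFoldMax_le _ _ _ _ (by omega)
            (fun u _ => by have := (pvIdx_bounds u t).2; simpa using this)
        simp only [hb, if_true, List.map_append]
        rw [PySem.List.pyGetD_eq_getElem _ _ hb (by simp; omega),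
            PySem.List.pyGetD_eq_getElem _ _ hb (by simp; omega)]
        rw [List.getElem_append_left]
      · simp [hb]

theorem pvAReduce (cats : List (String × List String)) (h : (cats.map (·.1)).Nodup)
    (Q : List String → Bool) (d : String) :
    (PySem.Dict.mk cats).keys.foldl (fun r k => if Q ((PySem.Dict.mk cats).getD k []) then k else r) d
    = cats.foldl (fun r c => if Q c.2 then c.1 else r) d := by
  rw [PySem.Dict.keys_mk, List.foldl_map]
  apply PySem.List.foldl_congr_mem
  intro acc c hc
  have hm : ((c.1, c.2) : String × List String) ∈ (PySem.Dict.mk cats).items := by simpa using hc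
  have hk : (PySem.Dict.mk cats).keys.Nodup := by rw [PySem.Dict.keys_mk]; exact h
  rw [PySem.Dict.getD_of_mem_items _ hm hk []]

-- ===== VERDICT (by name: the statement is the Claim_ definition above) =====
theorem add_categories_to_file_spec : Claim_equal_add_categories_to_file := by
  unfold Claim_equal_add_categories_to_file
  intro cats check _ hpre
  unfold Spec_add_categories_to_file add_categories_to_file add_categories_to_file_alt
  show (PySem.List.enumerate check 0).foldl
      (fun acc p =>
        if (PySem.Dict.mk p.2).contains "name" then
          PySem.List.pySetD acc p.1
            ((PySem.Dict.mk p.2).insert "category"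
              ((PySem.Dict.mk cats).keys.foldl (fun r category =>
                if (pvWords ((PySem.Dict.mk p.2).getD "name" "")).any
                    (fun word => ((PySem.Dict.mk cats).getD category []).contains word)
                then category else r) "не определена")).items
        else acc) check
    = check.map (fun g =>
        if (PySem.Dict.mk g).contains "name" then
          ((PySem.Dict.mk g).insert "category"
            (if 0 ≤ (pvWords ((PySem.Dict.mk g).getD "name" "")).foldl
                  (fun b w => max b ((pvIdx cats).getD w (-1))) (-1)
             then PySem.List.pyGetD (cats.map (·.1))
                  ((pvWords ((PySem.Dict.mk g).getD "name" "")).foldl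
                    (fun b w => max b ((pvIdx cats).getD w (-1))) (-1)) ""
             else "не определена")).items
        else g)
  have h0 := pvSetLoop (fun g => (PySem.Dict.mk g).contains "name")
    (fun g => ((PySem.Dict.mk g).insert "category"
      ((PySem.Dict.mk cats).keys.foldl (fun r category =>
        if (pvWords ((PySem.Dict.mk g).getD "name" "")).any
            (fun word => ((PySem.Dict.mk cats).getD category []).contains word)
        then category else r) "не определена")).items) check []
  simp only [List.length_nil, Int.natCast_zero, List.nil_append] at h0
  rw [h0]
  apply List.map_congr_left
  intro g _
  by_cases hname : (PySem.Dict.mk g).contains "name"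
  · simp only [hname, if_true]
    have hcat := pvAReduce cats hpre.1
      (fun wl => (pvWords ((PySem.Dict.mk g).getD "name" "")).any (fun w => wl.contains w))
      "не определена"
    rw [hcat, pvMain (pvWords ((PySem.Dict.mk g).getD "name" "")) cats]
  · simp [hname]
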